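-- pv_equiv track=rewrite | github.com/youngDaLee/algorithm_study | 코테합격자되기/8장/하경/24_신고결과받기.py | make_hash
-- ===== SOURCE A (Python) =====
-- def make_hash(id_list, report):
--     report_list = {}
--     report_count = {}
--
--     # report_list 해시테이블
--     for id in id_list:
--         report_list[id] = []
--     for rep in report:
--         rep = rep.split(" ")
--         report_list[rep[0]].append(rep[1])
--
--     #report_count 해시테이블
--     for id in id_list:
--         report_count[id] = 0
--     for rep in report:
--         rep = rep.split(" ")
--         report_count[rep[1]] += 1
--
--     return (report_list, report_count)
-- ===== SOURCE B (Python) =====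
-- def make_hash(id_list, report):
--     # split every line once, then build both tables by comprehensions over the ids
--     pairs = [rep.split(" ") for rep in report]
--     keys = list(dict.fromkeys(id_list))
--     report_list = {id: [p[1] for p in pairs if p[0] == id] for id in keys}
--     report_count = {id: sum(1 for p in pairs if p[1] == id) for id in keys}
--     return (report_list, report_count)
-- ===== Notes on version B (the rewrite author's own statement) =====
-- stated objective: alternative
-- what changed: Instead of initializing dicts and mutating them over two scans of report, B splits report once into pairs and builds both tables directly by comprehensions keyed on the (deduplicated) id_list, selecting/counting matching pairs per id.
import Mathlib
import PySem

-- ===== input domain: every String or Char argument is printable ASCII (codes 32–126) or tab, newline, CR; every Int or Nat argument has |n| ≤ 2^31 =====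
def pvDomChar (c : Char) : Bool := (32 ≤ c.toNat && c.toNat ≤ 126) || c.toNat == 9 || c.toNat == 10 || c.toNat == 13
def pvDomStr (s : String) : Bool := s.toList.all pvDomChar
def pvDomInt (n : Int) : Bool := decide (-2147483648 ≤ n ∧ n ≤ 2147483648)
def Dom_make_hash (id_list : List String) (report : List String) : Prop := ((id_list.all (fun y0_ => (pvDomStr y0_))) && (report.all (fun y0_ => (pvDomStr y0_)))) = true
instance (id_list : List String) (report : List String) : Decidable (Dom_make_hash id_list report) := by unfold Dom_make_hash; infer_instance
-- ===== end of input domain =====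

-- B builds both tables directly by comprehensions over the deduplicated id list on
-- once-split report lines, instead of A's two mutation passes over dicts; equal on Pre_.

-- shared helpers: rep.split(" ") and rep[i] (the .getD "" arm of pvAt is only reachable
-- outside Pre_, where Python raises IndexError)
def pvSplit (rep : String) : List String := (PySem.Str.split? rep " ").getD []
def pvAt (parts : List String) (i : Nat) : String := (PySem.List.pyGet? parts (i : Int)).getD ""

-- ===== PORT A =====
def make_hash (id_list : List String) (report : List String) : (List (String × List String)) × (List (String × Int)) :=
  let report_list : PySem.Dict String (List String) :=
    id_list.foldl (fun d id => d.insert id []) PySem.Dict.empty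
  -- report_list[rep[0]].append(rep[1]); a missing key (KeyError in Python) is outside Pre_
  let report_list :=
    report.foldl (fun d rep =>
      let parts := pvSplit rep
      d.modify (pvAt parts 0) [] (· ++ [pvAt parts 1])) report_list
  let report_count : PySem.Dict String Int :=
    id_list.foldl (fun d id => d.insert id 0) PySem.Dict.empty
  -- report_count[rep[1]] += 1; a missing key (KeyError in Python) is outside Pre_
  let report_count :=
    report.foldl (fun d rep =>
      let parts := pvSplit rep
      d.modify (pvAt parts 1) 0 (· + 1)) report_count
  (report_list.items, report_count.items)

-- ===== PORT B =====
def make_hash_alt (id_list : List String) (report : List String) : (List (String × List String)) × (List (String × Int)) :=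
  -- pairs = [rep.split(" ") for rep in report]
  let pairs := report.map pvSplit
  -- keys = list(dict.fromkeys(id_list))
  let keys := PySem.Set.ofList id_list
  -- {id: [p[1] for p in pairs if p[0] == id] for id in keys}
  let report_list :=
    keys.map (fun id => (id, (pairs.filter (fun p => pvAt p 0 == id)).map (fun p => pvAt p 1)))
  -- {id: sum(1 for p in pairs if p[1] == id) for id in keys}
  let report_count :=
    keys.map (fun id => (id, ((pairs.countP (fun p => pvAt p 1 == id) : Nat) : Int)))
  (report_list, report_count)

-- ===== PRECONDITION & SPEC =====
-- Pre_ is exactly where the Python A returns: every report line splits into at least two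
-- tokens (else IndexError) and both the reporter and the reported id are in id_list (else
-- KeyError).
def Pre_make_hash (id_list : List String) (report : List String) : Prop :=
  ∀ rep ∈ report, 2 ≤ (pvSplit rep).length ∧
    pvAt (pvSplit rep) 0 ∈ id_list ∧ pvAt (pvSplit rep) 1 ∈ id_list
instance (id_list : List String) (report : List String) : Decidable (Pre_make_hash id_list report) := by unfold Pre_make_hash; infer_instance

def pvWitness_make_hash : List String × List String := (["muzi", "frodo"], ["muzi frodo", "frodo muzi", "muzi frodo"])

def Spec_make_hash (id_list : List String) (report : List String) (out : (List (String × List String)) × (List (String × Int))) : Prop := out = make_hash_alt id_list report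
instance (id_list : List String) (report : List String) (out : (List (String × List String)) × (List (String × Int))) : Decidable (Spec_make_hash id_list report out) := by unfold Spec_make_hash; infer_instance

-- ===== CLAIM (what is proved, stated in full; the proofs are below) =====
def Claim_equal_make_hash : Prop := ∀ (id_list : List String) (report : List String), Dom_make_hash id_list report → Pre_make_hash id_list report → Spec_make_hash id_list report (make_hash id_list report)

-- ===== LEMMAS AND PROOFS =====

theorem set_update_of_subset {s : PySem.Set String} {xs : List String}
    (h : ∀ x ∈ xs, x ∈ s) : PySem.Set.update s xs = s := by
  rw [PySem.Set.update_eq_append_filter]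
  have : List.filter (fun y => !s.contains y) (PySem.Set.ofList xs) = [] := by
    rw [List.filter_eq_nil_iff]
    intro y hy
    have : y ∈ s := h y ((PySem.Set.mem_ofList xs y).mp hy)
    simp [PySem.Set.contains, this]
  rw [this, List.append_nil]

theorem getD_foldl_insert_const {ν : Type} (c : ν) (xs : List String) (d : PySem.Dict String ν)
    (h : ∀ k, d.getD k c = c) (k : String) :
    (xs.foldl (fun d x => d.insert x c) d).getD k c = c := by
  induction xs generalizing d with
  | nil => exact h k
  | cons x xs ih =>
      simp only [List.foldl_cons]
      exact ih _ (fun k' => by rw [PySem.Dict.getD_insert]; split <;> simp [h])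

-- ===== VERDICT (by name: the statement is the Claim_ definition above) =====
theorem make_hash_spec : Claim_equal_make_hash := by
  intro id_list report _hdom hpre
  unfold Spec_make_hash make_hash make_hash_alt
  classical
  set f1 : String → String := fun rep => pvAt (pvSplit rep) 1 with hf1
  set pairs : List (String × String) := report.map (fun rep => (pvAt (pvSplit rep) 0, pvAt (pvSplit rep) 1)) with hpairs
  set d0L : PySem.Dict String (List String) := id_list.foldl (fun d id => d.insert id []) PySem.Dict.empty with hd0L
  set d0C : PySem.Dict String Int := id_list.foldl (fun d id => d.insert id 0) PySem.Dict.empty with hd0C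
  set rl : PySem.Dict String (List String) := report.foldl (fun d rep =>
      let parts := pvSplit rep
      d.modify (pvAt parts 0) [] (· ++ [pvAt parts 1])) d0L with hrl
  have hRL : rl = pairs.foldl (fun d p => d.modify p.1 [] (· ++ [p.2])) d0L := by
    rw [hpairs, List.foldl_map]
  have hkeys0L : d0L.keys = PySem.Set.ofList id_list := by
    rw [hd0L, PySem.Dict.keys_foldl_insert]
    simp [PySem.Set.update_nil_left]
  have hkeys0C : d0C.keys = PySem.Set.ofList id_list := by
    rw [hd0C, PySem.Dict.keys_foldl_insert]
    simp [PySem.Set.update_nil_left]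
  have hsub : PySem.Set.update (PySem.Set.ofList id_list) (pairs.map (·.1)) = PySem.Set.ofList id_list := by
    apply set_update_of_subset
    intro x hx
    rw [PySem.Set.mem_ofList]
    rcases List.mem_map.mp hx with ⟨p, hp, rfl⟩
    rcases List.mem_map.mp hp with ⟨rep, hrep, rfl⟩
    exact (hpre rep hrep).2.1
  have hkeysRL : rl.keys = PySem.Set.ofList id_list := by
    have h := PySem.Dict.keys_foldl_modify_key pairs (fun p => p.1) [] (fun _ p v => v ++ [p.2]) d0L
    rw [hRL]
    exact h.trans (by rw [hkeys0L]; exact hsub)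
  have hndRL : rl.keys.Nodup := by rw [hkeysRL]; exact PySem.Set.nodup_ofList _
  have hgetD0L : ∀ c, d0L.getD c [] = [] := by
    intro c
    exact getD_foldl_insert_const [] id_list _ (fun k => PySem.Dict.getD_empty _ _) c
  have hgetRL : ∀ c, rl.getD c [] = (pairs.filter (fun p => p.1 == c)).map (·.2) := by
    intro c
    rw [hRL, PySem.Dict.getD_foldl_modify_append, hgetD0L]
    simp
  have hitemsRL : rl.items = (PySem.Set.ofList id_list).map (fun c => (c, (pairs.filter (fun p => p.1 == c)).map (·.2))) := by
    rw [PySem.Dict.items_eq_map_keys rl hndRL [], hkeysRL]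
    exact List.map_congr_left (fun c _ => by rw [hgetRL])
  set cA : PySem.Dict String Int := report.foldl (fun d rep =>
      let parts := pvSplit rep
      d.modify (pvAt parts 1) 0 (· + 1)) d0C with hcA
  have hCA : cA = (report.map f1).foldl (fun d x => d.modify x 0 (· + 1)) d0C := by
    rw [hcA, hf1, List.foldl_map]
  have hcovf1 : ∀ x ∈ report.map f1, x ∈ PySem.Set.ofList id_list := by
    intro x hx
    rw [PySem.Set.mem_ofList]
    rcases List.mem_map.mp hx with ⟨rep, hrep, rfl⟩
    exact (hpre rep hrep).2.2
  have hkeysA : cA.keys = PySem.Set.ofList id_list := by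
    have h := PySem.Dict.keys_foldl_modify (report.map f1) 0 (fun _ _ v => v + 1) d0C
    rw [hCA]
    exact h.trans (by rw [hkeys0C]; exact set_update_of_subset hcovf1)
  have hndA : cA.keys.Nodup := by rw [hkeysA]; exact PySem.Set.nodup_ofList _
  have hgetD0C : ∀ c, d0C.getD c 0 = 0 := by
    intro c
    exact getD_foldl_insert_const 0 id_list _ (fun k => PySem.Dict.getD_empty _ _) c
  have hitemsA : cA.items = (PySem.Set.ofList id_list).map
      (fun k => (k, (((report.map pvSplit).countP (fun p => pvAt p 1 == k) : Nat) : Int))) := by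
    rw [PySem.Dict.items_eq_map_keys cA hndA 0, hkeysA]
    apply List.map_congr_left
    intro k _
    have h1 : cA.getD k 0 = d0C.getD k 0 + ((report.map f1).count k : Int) := by
      rw [hCA]; exact PySem.Dict.getD_foldl_modify_add_one (report.map f1) d0C k
    have h2 : (report.map f1).count k = (report.map pvSplit).countP (fun p => pvAt p 1 == k) := by
      rw [List.count_eq_countP, List.countP_map, List.countP_map]
      rfl
    rw [h1, hgetD0C, h2, zero_add]
  show (rl.items, cA.items) = _
  rw [hitemsRL, hitemsA]
  refine Prod.ext ?_ rfl
  apply List.map_congr_left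
  intro c _
  rw [hpairs]
  simp only [List.filter_map, List.map_map]
  rfl
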